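-- pv_equiv track=rewrite | github.com/xscchoux/Leetcode-Submissions | 2539-Count the Number of Good Subsequences.py | countGoodSubsequences
-- ===== SOURCE A (Python) =====
-- def countGoodSubsequences(s: str) -> int:
--     kMod = 10**9+7
--     tot = 0
--
--     arr = [0]*26
--     for c in s:
--         arr[ord(c)-ord('a')] += 1
--
--     mx = max(arr)
--
--     fac = [1]*(mx+1)
--     ifac = [1]*(mx+1)
--
--     for i in range(1, mx+1):
--         fac[i] = (i*fac[i-1])%kMod
--         ifac[i] = (pow(i, -1, kMod)*ifac[i-1])%kMod
--
--     for num in range(1, mx+1):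
--         subtot = 1
--         for count in arr:
--             if count >= num:
--                 subtot = (subtot*(fac[count]*ifac[num]*ifac[count-num]+1)%kMod )%kMod
--         subtot -= 1
--         tot = (tot + subtot)%kMod
--
--     return tot
-- ===== SOURCE B (Python) =====
-- def countGoodSubsequences(s: str) -> int:
--     kMod = 10**9 + 7
--
--     arr = [0] * 26
--     for c in s:
--         arr[ord(c) - ord('a')] += 1
--
--     mx = max(arr)
--
--     # Pascal's triangle mod kMod: tri[n][k] == C(n, k) % kMod  (no factorials, no modular inverses)
--     tri = [[1]]
--     for n in range(1, mx + 1):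
--         prev = tri[-1]
--         tri.append([1] + [(prev[k - 1] + prev[k]) % kMod for k in range(1, n)] + [1])
--
--     # letter-major accumulation: prod[k] collects the product of (C(count, k) + 1) over all 26 counts
--     prod = [1] * (mx + 1)
--     for count in arr:
--         row = tri[count]
--         for k in range(1, count + 1):
--             prod[k] = prod[k] * (row[k] + 1) % kMod
--
--     tot = 0
--     for k in range(1, mx + 1):
--         tot = (tot + prod[k] - 1) % kMod
--     return tot
-- ===== Notes on version B (the rewrite author's own statement) =====
-- stated objective: alternative
-- what changed: Replaces A's factorial/inverse-factorial tables (one extended-gcd pow(i,-1,p) per i) and its k-major inner scan of the counts by an additive Pascal-triangle table of binomials mod p (no modular inverses at all) consumed letter-major: each count multiplies its Pascal-row entries into a product array prod[1..count], and the answer is a final pass summing prod[k]-1.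
import Mathlib
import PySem

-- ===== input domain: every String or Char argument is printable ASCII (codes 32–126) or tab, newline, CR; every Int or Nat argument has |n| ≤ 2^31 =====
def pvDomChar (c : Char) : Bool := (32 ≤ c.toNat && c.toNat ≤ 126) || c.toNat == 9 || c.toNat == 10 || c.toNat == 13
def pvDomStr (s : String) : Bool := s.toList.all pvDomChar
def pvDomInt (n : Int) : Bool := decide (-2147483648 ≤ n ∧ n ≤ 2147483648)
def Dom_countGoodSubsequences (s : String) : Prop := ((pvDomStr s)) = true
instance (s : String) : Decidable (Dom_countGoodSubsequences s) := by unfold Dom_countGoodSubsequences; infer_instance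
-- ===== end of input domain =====

-- B replaces A's factorial / modular-inverse binomials and k-major inner scan by an additive
-- Pascal-triangle table consumed letter-major into a product array (objective: alternative).

-- ===== PORT A =====
-- pow(a, -1, m): Python returns the unique r in [0, m) with a*r ≡ 1 (mod m) when gcd(a, m) = 1
-- (and raises ValueError otherwise — those inputs are excluded by Pre_); this computes exactly that r
-- from the extended Euclidean coefficient, so it is exact on every input Pre_ admits (0 < a, 0 < m).
def pyModInv (a m : Int) : Int := PySem.Int.mod (Nat.gcdA a.toNat m.toNat) m

def countGoodSubsequences (s : String) : Int :=
  let kMod : Int := 10 ^ 9 + 7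
  let tot : Int := 0
  let arr : List Int := List.replicate 26 0
  let arr := s.toList.foldl (fun arr c =>
    PySem.List.pySetD arr ((c.toNat : Int) - 97) (PySem.List.pyGetD arr ((c.toNat : Int) - 97) 0 + 1)) arr
  let mx : Int := (PySem.List.max? arr (fun x => x)).getD 0
  let facs := (PySem.List.pyRange 1 (mx + 1) 1).foldl
    (fun (st : List Int × List Int) i =>
      (PySem.List.pySetD st.1 i (PySem.Int.mod (i * PySem.List.pyGetD st.1 (i - 1) 0) kMod),
       PySem.List.pySetD st.2 i (PySem.Int.mod (pyModInv i kMod * PySem.List.pyGetD st.2 (i - 1) 0) kMod)))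
    (List.replicate (mx + 1).toNat 1, List.replicate (mx + 1).toNat 1)
  let fac := facs.1
  let ifac := facs.2
  let tot := (PySem.List.pyRange 1 (mx + 1) 1).foldl (fun tot num =>
    let subtot := arr.foldl (fun subtot count =>
      if count ≥ num then
        PySem.Int.mod (PySem.Int.mod (subtot * (PySem.List.pyGetD fac count 0 * PySem.List.pyGetD ifac num 0 * PySem.List.pyGetD ifac (count - num) 0 + 1)) kMod) kMod
      else subtot) 1
    let subtot := subtot - 1
    PySem.Int.mod (tot + subtot) kMod) tot
  tot

-- ===== PORT B =====
def countGoodSubsequences_alt (s : String) : Int :=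
  let kMod : Int := 10 ^ 9 + 7
  let arr : List Int := List.replicate 26 0
  let arr := s.toList.foldl (fun arr c =>
    PySem.List.pySetD arr ((c.toNat : Int) - 97) (PySem.List.pyGetD arr ((c.toNat : Int) - 97) 0 + 1)) arr
  let mx : Int := (PySem.List.max? arr (fun x => x)).getD 0
  -- Pascal's triangle mod kMod, rows 0..mx (tri[-1] = the last row built)
  let tri : List (List Int) := (PySem.List.pyRange 1 (mx + 1) 1).foldl
    (fun tri n =>
      let prev := PySem.List.pyGetD tri (-1) []
      tri ++ [[1] ++ (PySem.List.pyRange 1 n 1).map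
        (fun k => PySem.Int.mod (PySem.List.pyGetD prev (k - 1) 0 + PySem.List.pyGetD prev k 0) kMod) ++ [1]])
    [[1]]
  -- letter-major accumulation into the product array
  let prod : List Int := List.replicate (mx + 1).toNat 1
  let prod := arr.foldl (fun prod count =>
      let row := PySem.List.pyGetD tri count []
      (PySem.List.pyRange 1 (count + 1) 1).foldl
        (fun prod k => PySem.List.pySetD prod k
          (PySem.Int.mod (PySem.List.pyGetD prod k 0 * (PySem.List.pyGetD row k 0 + 1)) kMod)) prod)
    prod
  let tot := (PySem.List.pyRange 1 (mx + 1) 1).foldl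
    (fun tot k => PySem.Int.mod (tot + PySem.List.pyGetD prod k 0 - 1) kMod) 0
  tot

-- ===== PRECONDITION & SPEC =====
-- how many characters of s fall in bucket j of A's 26-slot tally (Python's negative-index
-- wraparound identifies character code k with k + 26 for k in 71..96)
def bCnt (cs : List Char) (j : Nat) : Nat := cs.countP (fun c => (c.toNat + 26 - 97) % 26 == j)

-- Pre_ excludes exactly the inputs where A raises: a character with code outside 71..122 makes
-- `arr[ord(c) - ord('a')]` an IndexError (in both A and B, which share the tally loop), and a
-- bucket count i with gcd(i, 10^9+7) ≠ 1 makes A's `pow(i, -1, kMod)` a ValueError.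
def Pre_countGoodSubsequences (s : String) : Prop :=
  (s.toList.all (fun c => 71 ≤ c.toNat && c.toNat ≤ 122) = true) ∧
  (∀ j ∈ List.range 26, ∀ n ∈ List.range (bCnt s.toList j + 1), n = 0 ∨ Nat.gcd n 1000000007 = 1)
instance (s : String) : Decidable (Pre_countGoodSubsequences s) := by
  unfold Pre_countGoodSubsequences; infer_instance

def pvWitness_countGoodSubsequences : String := "abc"

def Spec_countGoodSubsequences (s : String) (out : Int) : Prop := out = countGoodSubsequences_alt s
instance (s : String) (out : Int) : Decidable (Spec_countGoodSubsequences s out) := by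
  unfold Spec_countGoodSubsequences; infer_instance

-- ===== CLAIM (what is proved, stated in full; the proofs are below) =====
def Claim_equal_countGoodSubsequences : Prop := ∀ (s : String), Dom_countGoodSubsequences s → Pre_countGoodSubsequences s → Spec_countGoodSubsequences s (countGoodSubsequences s)

-- ===== LEMMAS AND PROOFS =====

-- ---- shared tally characterization ----
def tstep (a : List Int) (c : Char) : List Int :=
  PySem.List.pySetD a ((c.toNat : Int) - 97) (PySem.List.pyGetD a ((c.toNat : Int) - 97) 0 + 1)

lemma pyIdx_wrap (k : Nat) (h1 : 71 ≤ k) (h2 : k ≤ 122) :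
    PySem.List.pyIdx? 26 ((k : Int) - 97) = some ((k + 26 - 97) % 26) := by
  unfold PySem.List.pyIdx?
  rcases Nat.lt_or_ge k 97 with h | h
  · rw [if_neg (by omega), if_pos (by push_cast; omega)]
    congr 1; omega
  · rw [if_pos (by omega), if_pos (by push_cast; omega)]
    congr 1; omega

lemma tstep_eq (a : List Int) (c : Char) (h1 : 71 ≤ c.toNat) (h2 : c.toNat ≤ 122) (ha : a.length = 26) :
    tstep a c = a.set ((c.toNat + 26 - 97) % 26) (a.getD ((c.toNat + 26 - 97) % 26) 0 + 1) := by
  unfold tstep PySem.List.pySetD PySem.List.pySet? PySem.List.pyGetD PySem.List.pyGet?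
  rw [ha, pyIdx_wrap _ h1 h2]
  simp [List.getD]

lemma tally_aux (cs : List Char) (h : ∀ c ∈ cs, 71 ≤ c.toNat ∧ c.toNat ≤ 122) :
    ∀ a : List Int, a.length = 26 →
      cs.foldl tstep a = (List.range 26).map (fun j => a.getD j 0 + (bCnt cs j : Int)) := by
  induction cs with
  | nil =>
    intro a ha
    simp only [List.foldl_nil, bCnt, List.countP_nil, Nat.cast_zero, add_zero]
    apply List.ext_getElem (by simp [ha])
    intro i hi1 hi2
    simp at hi2
    simp [List.getD_eq_getElem?_getD, List.getElem?_eq_getElem, hi2, ha]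
  | cons c cs ih =>
    intro a ha
    have hc := h c (by simp)
    rw [List.foldl_cons, tstep_eq a c hc.1 hc.2 ha,
      ih (fun x hx => h x (by simp [hx])) _ (by simp [ha])]
    apply List.map_congr_left
    intro j hj
    simp only [List.mem_range] at hj
    have hlt : (c.toNat + 26 - 97) % 26 < 26 := Nat.mod_lt _ (by norm_num)
    by_cases hje : j = (c.toNat + 26 - 97) % 26
    · subst hje
      rw [List.getD_eq_getElem?_getD, List.getElem?_set_self (by omega), Option.getD_some]
      simp only [bCnt, List.countP_cons, beq_self_eq_true, if_true]
      push_cast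
      ring
    · rw [List.getD_eq_getElem?_getD, List.getElem?_set_ne (by omega), ← List.getD_eq_getElem?_getD]
      have hbe : ((c.toNat + 26 - 97) % 26 == j) = false := by
        simp only [beq_eq_false_iff_ne, ne_eq]; omega
      simp [bCnt, List.countP_cons, hbe]
      omega

lemma tally_eq (cs : List Char) (h : ∀ c ∈ cs, 71 ≤ c.toNat ∧ c.toNat ≤ 122) :
    cs.foldl tstep (List.replicate 26 0) = (List.range 26).map (fun j => (bCnt cs j : Int)) := by
  rw [tally_aux cs h _ (by simp)]
  apply List.map_congr_left
  intro j hj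
  simp at hj
  rw [List.getD_replicate]
  · simp
  · exact hj

-- ---- A's factorial / inverse-factorial tables ----
def F : Nat → Int
  | 0 => 1
  | k + 1 => PySem.Int.mod (((k : Int) + 1) * F k) (10 ^ 9 + 7)

def Gm : Nat → Int
  | 0 => 1
  | k + 1 => PySem.Int.mod (pyModInv ((k : Int) + 1) (10 ^ 9 + 7) * Gm k) (10 ^ 9 + 7)

def stepFac (st : List Int × List Int) (i : Int) : List Int × List Int :=
  (PySem.List.pySetD st.1 i (PySem.Int.mod (i * PySem.List.pyGetD st.1 (i - 1) 0) (10 ^ 9 + 7)),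
   PySem.List.pySetD st.2 i (PySem.Int.mod (pyModInv i (10 ^ 9 + 7) * PySem.List.pyGetD st.2 (i - 1) 0) (10 ^ 9 + 7)))

lemma set_fill (xs : List Int) (n pad : Nat) (hn : xs.length = n) (hpad : 1 ≤ pad) {d v : Int} :
    (xs ++ List.replicate pad d).set n v = (xs ++ [v]) ++ List.replicate (pad - 1) d := by
  subst hn
  rw [List.set_append, if_neg (by omega)]
  obtain ⟨m, rfl⟩ : ∃ m, pad = m + 1 := ⟨pad - 1, by omega⟩
  simp [List.replicate_succ]

lemma getD_table (f : Nat → Int) (t m : Nat) {pad : Nat} (ht : t < m) :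
    ((List.range m).map f ++ List.replicate pad 1).getD t 0 = f t := by
  rw [List.getD_append _ _ _ _ (by simp [ht]), PySem.List.getD_map_range _ _ _ _ ht]

lemma facs_aux (M : Nat) : ∀ t : Nat, t ≤ M →
    (PySem.List.pyRange 1 ((t : Int) + 1)).foldl stepFac
        (List.replicate (M + 1) 1, List.replicate (M + 1) 1)
      = ((List.range (t + 1)).map F ++ List.replicate (M - t) 1,
         (List.range (t + 1)).map Gm ++ List.replicate (M - t) 1) := by
  intro t
  induction t with
  | zero =>
    intro _
    have h1 : ((0 : Nat) : Int) + 1 = 1 := by norm_num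
    rw [h1]
    have h2 : PySem.List.pyRange 1 1 = [] := by decide
    rw [h2, List.foldl_nil]
    simp [F, Gm, List.replicate_succ]
  | succ t ih =>
    intro ht
    have h1 : ((t + 1 : Nat) : Int) + 1 = ((t : Int) + 1) + 1 := by push_cast; ring
    rw [h1, PySem.List.pyRange_one_succ_right (by push_cast; omega), List.foldl_append,
      ih (by omega), List.foldl_cons, List.foldl_nil]
    unfold stepFac
    have hidx : (t : Int) + 1 - 1 = ((t : Nat) : Int) := by ring
    have hlen : ((List.range (t + 1)).map F).length = t + 1 := by simp
    have hlenG : ((List.range (t + 1)).map Gm).length = t + 1 := by simp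
    have htoNat : ((t : Int) + 1).toNat = t + 1 := by omega
    rw [hidx]
    simp only [PySem.List.pyGetD_natCast]
    rw [getD_table F t (t + 1) (by omega), getD_table Gm t (t + 1) (by omega)]
    rw [PySem.List.pySetD_of_nonneg _ _ (by omega), PySem.List.pySetD_of_nonneg _ _ (by omega), htoNat]
    rw [set_fill _ _ _ hlen (by omega), set_fill _ _ _ hlenG (by omega)]
    have hrangesucc : List.range (t + 1 + 1) = List.range (t + 1) ++ [t + 1] := List.range_succ
    rw [hrangesucc, List.map_append, List.map_append]
    have hF : F (t + 1) = PySem.Int.mod (((t : Int) + 1) * F t) (10 ^ 9 + 7) := rfl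
    have hG : Gm (t + 1) = PySem.Int.mod (pyModInv ((t : Int) + 1) (10 ^ 9 + 7) * Gm t) (10 ^ 9 + 7) := rfl
    have hsub : M - t - 1 = M - (t + 1) := by omega
    simp [hF, hG, hsub]

-- ---- casting to ZMod ----
lemma km_cast' : ((10 : Int) ^ 9 + 7) = ((1000000007 : Nat) : Int) := by norm_num

lemma castmod' (x : Int) :
    ((PySem.Int.mod x (10 ^ 9 + 7) : Int) : ZMod 1000000007) = (x : ZMod 1000000007) := by
  rw [PySem.Int.mod_eq_emod_of_pos (by norm_num), km_cast', ZMod.intCast_mod]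

lemma mod_idem (a : Int) :
    PySem.Int.mod (PySem.Int.mod a (10 ^ 9 + 7)) (10 ^ 9 + 7) = PySem.Int.mod a (10 ^ 9 + 7) := by
  simp only [PySem.Int.mod_eq_emod_of_pos (show (0:Int) < 10 ^ 9 + 7 by norm_num)]
  exact Int.emod_emod_of_dvd a dvd_rfl

-- a mod-multiplying conditional fold, its bounds and its image in ZMod 1000000007
lemma fold_mod_cast (cond : Int → Prop) [DecidablePred cond] (g : Int → Int) (l : List Int) :
    ∀ init : Int, 0 ≤ init → init < 10 ^ 9 + 7 →
      (0 ≤ l.foldl (fun x c => if cond c then PySem.Int.mod (x * g c) (10 ^ 9 + 7) else x) init ∧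
       l.foldl (fun x c => if cond c then PySem.Int.mod (x * g c) (10 ^ 9 + 7) else x) init < 10 ^ 9 + 7) ∧
      ((l.foldl (fun x c => if cond c then PySem.Int.mod (x * g c) (10 ^ 9 + 7) else x) init : Int) : ZMod 1000000007)
        = (init : ZMod 1000000007) *
          ((l.filter (fun c => decide (cond c))).map (fun c => ((g c : Int) : ZMod 1000000007))).prod := by
  induction l with
  | nil => intro init h0 h1; exact ⟨⟨h0, h1⟩, by simp⟩
  | cons c l ih =>
    intro init h0 h1
    by_cases hc : cond c
    · have := ih (PySem.Int.mod (init * g c) (10 ^ 9 + 7))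
        (PySem.Int.mod_nonneg _ (by norm_num)) (PySem.Int.mod_lt _ (by norm_num))
      simp only [List.foldl_cons, if_pos hc, List.filter_cons, decide_eq_true_eq, hc, if_pos]
      refine ⟨this.1, ?_⟩
      rw [this.2, castmod', List.map_cons, List.prod_cons]
      push_cast
      ring
    · have := ih init h0 h1
      simp only [List.foldl_cons, if_neg hc, List.filter_cons, decide_eq_true_eq, hc]
      simpa using this

lemma int_eq_of_cast {x y : Int} (hx0 : 0 ≤ x) (hx1 : x < 10 ^ 9 + 7) (hy0 : 0 ≤ y)
    (hy1 : y < 10 ^ 9 + 7) (h : (x : ZMod 1000000007) = (y : ZMod 1000000007)) : x = y := by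
  have hm : x ≡ y [ZMOD (1000000007 : Nat)] := (ZMod.intCast_eq_intCast_iff x y _).mp h
  have hm' : x % ((1000000007 : Nat) : Int) = y % ((1000000007 : Nat) : Int) := hm
  rw [Int.emod_eq_of_lt hx0 (by push_cast; omega), Int.emod_eq_of_lt hy0 (by push_cast; omega)] at hm'
  exact hm'

-- ---- A's binomial from fac/ifac equals the binomial coefficient in ZMod ----
lemma pyModInv_cast (n : Nat) (hg : Nat.gcd n 1000000007 = 1) :
    ((n : Int) : ZMod 1000000007) * ((pyModInv (n : Int) (10 ^ 9 + 7) : Int) : ZMod 1000000007) = 1 := by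
  unfold pyModInv
  rw [castmod']
  have ht : ((n : Int)).toNat = n := Int.toNat_natCast n
  have ht2 : ((10 : Int) ^ 9 + 7).toNat = 1000000007 := by rfl
  have hzero : (1000000007 : ZMod 1000000007) = 0 := by
    rw [← Nat.cast_ofNat]; exact ZMod.natCast_self _
  rw [ht, ht2]
  have h2 := congrArg (fun z : Int => (z : ZMod 1000000007)) (Nat.gcd_eq_gcd_ab n 1000000007)
  simp only [hg] at h2
  push_cast at h2
  rw [hzero] at h2
  push_cast
  linear_combination -h2

lemma F_cast (i : Nat) : ((F i : Int) : ZMod 1000000007) = ((i.factorial : Nat) : ZMod 1000000007) := by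
  induction i with
  | zero => simp [F, Nat.factorial]
  | succ k ih =>
    rw [F, castmod', Nat.factorial_succ]
    push_cast
    rw [ih]

lemma FG_one (M : Nat) (hcop : ∀ n : Nat, 1 ≤ n → n ≤ M → Nat.gcd n 1000000007 = 1) :
    ∀ i ≤ M, ((F i : Int) : ZMod 1000000007) * ((Gm i : Int) : ZMod 1000000007) = 1 := by
  intro i
  induction i with
  | zero => intro _; norm_num [F, Gm]
  | succ k ih =>
    intro hk
    rw [F, Gm, castmod', castmod']
    push_cast
    have h1 := pyModInv_cast (k + 1) (by exact_mod_cast hcop (k + 1) (by omega) hk)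
    push_cast at h1
    have h2 := ih (by omega)
    have h12 := congrArg₂ (fun a b : ZMod 1000000007 => a * b) h1 h2
    simp only [one_mul] at h12
    linear_combination h12

lemma binomA (M : Nat) (hcop : ∀ n : Nat, 1 ≤ n → n ≤ M → Nat.gcd n 1000000007 = 1)
    (c n : Nat) (hn : n ≤ c) (hc : c ≤ M) :
    ((F c : Int) : ZMod 1000000007) * ((Gm n : Int) : ZMod 1000000007) *
      ((Gm (c - n) : Int) : ZMod 1000000007) = ((c.choose n : Nat) : ZMod 1000000007) := by
  have hfact := congrArg (fun z : Nat => (z : ZMod 1000000007))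
    (Nat.choose_mul_factorial_mul_factorial hn)
  push_cast at hfact
  have h1 := FG_one M hcop n (le_trans hn hc)
  have h2 := FG_one M hcop (c - n) (le_trans (Nat.sub_le _ _) hc)
  rw [F_cast n] at h1
  rw [F_cast (c - n)] at h2
  rw [F_cast c, ← hfact]
  linear_combination (((c.choose n : Nat) : ZMod 1000000007) *
      (((c - n).factorial : ZMod 1000000007)) * ((Gm (c - n) : Int) : ZMod 1000000007)) * h1 +
    ((c.choose n : Nat) : ZMod 1000000007) * h2

-- ---- B's Pascal triangle ----
def Cmod (n k : Nat) : Int := ((n.choose k % 1000000007 : Nat) : Int)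

def triRow (n : Nat) : List Int := (List.range (n + 1)).map (Cmod n)

lemma Cmod_zero (n : Nat) : Cmod n 0 = 1 := by
  simp [Cmod, Nat.choose_zero_right]

lemma Cmod_self (n : Nat) : Cmod n n = 1 := by
  simp [Cmod, Nat.choose_self]

lemma Cmod_cast (n k : Nat) :
    ((Cmod n k : Int) : ZMod 1000000007) = ((n.choose k : Nat) : ZMod 1000000007) := by
  unfold Cmod
  rw [Int.cast_natCast]
  exact ZMod.natCast_mod (n.choose k) 1000000007

def triStep (tri : List (List Int)) (n : Int) : List (List Int) :=
  tri ++ [[1] ++ (PySem.List.pyRange 1 n 1).map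
    (fun k => PySem.Int.mod (PySem.List.pyGetD (PySem.List.pyGetD tri (-1) []) (k - 1) 0 +
      PySem.List.pyGetD (PySem.List.pyGetD tri (-1) []) k 0) (10 ^ 9 + 7)) ++ [1]]

lemma triRow_getD (n k : Nat) (hk : k ≤ n) : (triRow n).getD k 0 = Cmod n k := by
  unfold triRow
  exact PySem.List.getD_map_range _ _ _ _ (by omega)

lemma triRow_succ (t : Nat) :
    [1] ++ (PySem.List.pyRange 1 ((t : Int) + 1) 1).map
      (fun k => PySem.Int.mod (PySem.List.pyGetD (triRow t) (k - 1) 0 +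
        PySem.List.pyGetD (triRow t) k 0) (10 ^ 9 + 7)) ++ [1]
    = triRow (t + 1) := by
  rw [PySem.List.pyRange_one]
  have ht : ((t : Int) + 1 - 1).toNat = t := by omega
  rw [ht, List.map_map]
  have hmid : (List.range t).map ((fun k => PySem.Int.mod (PySem.List.pyGetD (triRow t) (k - 1) 0 +
        PySem.List.pyGetD (triRow t) k 0) (10 ^ 9 + 7)) ∘ (fun k : Nat => (1 : Int) + k))
      = (List.range t).map (fun j => Cmod (t + 1) (j + 1)) := by
    apply List.map_congr_left
    intro j hj
    simp only [List.mem_range] at hj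
    simp only [Function.comp]
    have h1 : (1 : Int) + (j : Int) - 1 = ((j : Nat) : Int) := by push_cast; ring
    have h2 : (1 : Int) + (j : Int) = ((j + 1 : Nat) : Int) := by push_cast; ring
    rw [h1, h2, PySem.List.pyGetD_natCast, PySem.List.pyGetD_natCast,
      triRow_getD t j (by omega), triRow_getD t (j + 1) (by omega)]
    unfold Cmod
    rw [km_cast']
    have hadd : ((t.choose j % 1000000007 : Nat) : Int) + ((t.choose (j + 1) % 1000000007 : Nat) : Int)
        = ((t.choose j % 1000000007 + t.choose (j + 1) % 1000000007 : Nat) : Int) := by push_cast; ring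
    rw [hadd, PySem.Int.mod_natCast]
    congr 1
    rw [← Nat.add_mod, ← Nat.choose_succ_succ]
  rw [hmid]
  unfold triRow
  rw [List.range_succ_eq_map, List.range_succ]
  simp only [List.map_cons, List.map_append, List.map_map, List.map_singleton]
  rw [Cmod_zero]
  simp [Function.comp_def, Cmod_self]

lemma tri_aux : ∀ t : Nat,
    (PySem.List.pyRange 1 ((t : Int) + 1) 1).foldl triStep [[1]]
      = (List.range (t + 1)).map triRow := by
  intro t
  induction t with
  | zero =>
    have h1 : ((0 : Nat) : Int) + 1 = 1 := by norm_num
    rw [h1]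
    have h2 : PySem.List.pyRange 1 1 = [] := by decide
    rw [h2, List.foldl_nil]
    have : triRow 0 = [1] := by
      unfold triRow
      simp [Cmod_zero]
    simp [this]
  | succ t ih =>
    have h1 : ((t + 1 : Nat) : Int) + 1 = ((t : Int) + 1) + 1 := by push_cast; ring
    rw [h1, PySem.List.pyRange_one_succ_right (by push_cast; omega), List.foldl_append, ih,
      List.foldl_cons, List.foldl_nil]
    unfold triStep
    have hlast : PySem.List.pyGetD ((List.range (t + 1)).map triRow) (-1) [] = triRow t := by
      rw [List.range_succ, List.map_append, List.map_singleton,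
        PySem.List.pyGetD_neg_one_append_singleton]
    rw [hlast, triRow_succ]
    rw [show List.range (t + 1 + 1) = List.range (t + 1) ++ [t + 1] from List.range_succ,
      List.map_append, List.map_singleton]

-- ---- B's letter-major product accumulation ----
def rowStep (row : List Int) (prod : List Int) (k : Int) : List Int :=
  PySem.List.pySetD prod k
    (PySem.Int.mod (PySem.List.pyGetD prod k 0 * (PySem.List.pyGetD row k 0 + 1)) (10 ^ 9 + 7))

def condFac (n k : Nat) (x : Int) : Int := PySem.Int.mod (x * (Cmod n k + 1)) (10 ^ 9 + 7)

lemma set_map_range (m i : Nat) (g : Nat → Int) (v : Int) (hi : i < m) :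
    ((List.range m).map g).set i v = (List.range m).map (fun k => if k = i then v else g k) := by
  apply List.ext_getElem (by simp)
  intro j hj1 hj2
  simp only [List.length_set, List.length_map, List.length_range] at hj1
  by_cases hji : j = i
  · subst hji
    rw [List.getElem_set_self]
    simp [hj1]
  · rw [List.getElem_set_ne (by omega)]
    simp [hj1, hji]

lemma inner_char (n M : Nat) (hn : n ≤ M) (f : Nat → Int) : ∀ t : Nat, t ≤ n →
    (PySem.List.pyRange 1 ((t : Int) + 1) 1).foldl (rowStep (triRow n)) ((List.range (M + 1)).map f)
      = (List.range (M + 1)).map (fun k => if 1 ≤ k ∧ k ≤ t then condFac n k (f k) else f k) := by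
  intro t
  induction t with
  | zero =>
    intro _
    have h1 : ((0 : Nat) : Int) + 1 = 1 := by norm_num
    rw [h1]
    have h2 : PySem.List.pyRange 1 1 = [] := by decide
    rw [h2, List.foldl_nil]
    apply List.map_congr_left
    intro k _
    rw [if_neg (by omega)]
  | succ t ih =>
    intro ht
    have h1 : ((t + 1 : Nat) : Int) + 1 = ((t : Int) + 1) + 1 := by push_cast; ring
    rw [h1, PySem.List.pyRange_one_succ_right (by push_cast; omega), List.foldl_append,
      ih (by omega), List.foldl_cons, List.foldl_nil]
    unfold rowStep
    have hcast : (t : Int) + 1 = ((t + 1 : Nat) : Int) := by push_cast; ring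
    rw [hcast, PySem.List.pyGetD_natCast, PySem.List.pyGetD_natCast, PySem.List.pySetD_natCast]
    rw [PySem.List.getD_map_range _ _ _ _ (by omega), triRow_getD n (t + 1) (by omega)]
    rw [if_neg (by omega)]
    rw [set_map_range _ _ _ _ (by omega)]
    apply List.map_congr_left
    intro k hk
    simp only [List.mem_range] at hk
    by_cases hke : k = t + 1
    · subst hke
      rw [if_pos rfl, if_pos (by omega)]
      rfl
    · rw [if_neg hke]
      by_cases hk2 : 1 ≤ k ∧ k ≤ t
      · rw [if_pos hk2, if_pos (by omega)]
      · rw [if_neg hk2, if_neg (by omega)]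

lemma outer_char (M : Nat) (R : List Int) (hR : ∀ c ∈ R, 0 ≤ c ∧ c ≤ (M : Int)) :
    ∀ f : Nat → Int,
      R.foldl (fun prod c =>
          (PySem.List.pyRange 1 (c + 1) 1).foldl
            (rowStep (PySem.List.pyGetD ((List.range (M + 1)).map triRow) c [])) prod)
        ((List.range (M + 1)).map f)
      = (List.range (M + 1)).map (fun (k : Nat) =>
          R.foldl (fun x c => if 1 ≤ k ∧ (k : Int) ≤ c then condFac c.toNat k x else x) (f k)) := by
  induction R with
  | nil => intro f; simp
  | cons c R ih =>
    intro f
    have hc := hR c (by simp)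
    obtain ⟨n, rfl⟩ : ∃ n : Nat, c = (n : Int) := ⟨c.toNat, by omega⟩
    have hnM : n ≤ M := by exact_mod_cast hc.2
    have hrow : PySem.List.pyGetD ((List.range (M + 1)).map triRow) ((n : Nat) : Int) [] = triRow n := by
      rw [PySem.List.pyGetD_natCast, PySem.List.getD_map_range _ _ _ _ (by omega)]
    rw [List.foldl_cons, hrow, inner_char n M hnM f n le_rfl,
      ih (fun x hx => hR x (by simp [hx]))]
    apply List.map_congr_left
    intro k _
    rw [List.foldl_cons]
    congr 1
    have hcond : (1 ≤ k ∧ (k : Int) ≤ (n : Int)) ↔ (1 ≤ k ∧ k ≤ n) := by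
      constructor <;> (intro h; exact ⟨h.1, by exact_mod_cast h.2⟩)
    by_cases hk : 1 ≤ k ∧ k ≤ n
    · rw [if_pos hk, if_pos (hcond.mpr hk)]
      simp
    · rw [if_neg hk, if_neg (fun h => hk (hcond.mp h))]

-- per-index value of B's final product array
def PB (R : List Int) (k : Nat) : Int :=
  R.foldl (fun x c => if 1 ≤ k ∧ (k : Int) ≤ c then condFac c.toNat k x else x) 1

-- ---- per-num equality of A's subtot and B's prod[num] ----
lemma elemA (M : Nat) (hcop : ∀ n : Nat, 1 ≤ n → n ≤ M → Nat.gcd n 1000000007 = 1)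
    (t : Nat) (htM : t + 1 ≤ M) (k : Int) (hk0 : 0 ≤ k) (hkM : k.toNat ≤ M)
    (hge : ((t + 1 : Nat) : Int) ≤ k) :
    ((PySem.List.pyGetD ((List.range (M + 1)).map F) k 0 *
        PySem.List.pyGetD ((List.range (M + 1)).map Gm) ((t + 1 : Nat) : Int) 0 *
        PySem.List.pyGetD ((List.range (M + 1)).map Gm) (k - ((t + 1 : Nat) : Int)) 0 + 1 : Int)
      : ZMod 1000000007)
      = ((Cmod k.toNat (t + 1) : Int) : ZMod 1000000007) + 1 := by
  obtain ⟨n, rfl⟩ : ∃ n : Nat, k = (n : Int) := ⟨k.toNat, by omega⟩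
  simp only [Int.toNat_natCast] at hkM ⊢
  have hgen : t + 1 ≤ n := by exact_mod_cast hge
  have hsub : (n : Int) - ((t + 1 : Nat) : Int) = ((n - (t + 1) : Nat) : Int) := by omega
  rw [hsub, PySem.List.pyGetD_natCast, PySem.List.pyGetD_natCast, PySem.List.pyGetD_natCast,
    PySem.List.getD_map_range _ _ _ _ (by omega), PySem.List.getD_map_range _ _ _ _ (by omega),
    PySem.List.getD_map_range _ _ _ _ (by omega)]
  rw [Cmod_cast]
  push_cast
  rw [binomA M hcop n (t + 1) hgen hkM]

lemma subtot_eq (M : Nat) (hcop : ∀ n : Nat, 1 ≤ n → n ≤ M → Nat.gcd n 1000000007 = 1)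
    (R : List Int) (hR : ∀ c ∈ R, 0 ≤ c ∧ c ≤ (M : Int)) (t : Nat) (htM : t + 1 ≤ M) :
    R.foldl (fun subtot count =>
        if count ≥ ((t + 1 : Nat) : Int) then
          PySem.Int.mod (PySem.Int.mod (subtot *
            (PySem.List.pyGetD ((List.range (M + 1)).map F) count 0 *
             PySem.List.pyGetD ((List.range (M + 1)).map Gm) ((t + 1 : Nat) : Int) 0 *
             PySem.List.pyGetD ((List.range (M + 1)).map Gm) (count - ((t + 1 : Nat) : Int)) 0 + 1))
            (10 ^ 9 + 7)) (10 ^ 9 + 7)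
        else subtot) 1
      = PB R (t + 1) := by
  have hA := fold_mod_cast (fun c => c ≥ ((t + 1 : Nat) : Int))
    (fun c => PySem.List.pyGetD ((List.range (M + 1)).map F) c 0 *
      PySem.List.pyGetD ((List.range (M + 1)).map Gm) ((t + 1 : Nat) : Int) 0 *
      PySem.List.pyGetD ((List.range (M + 1)).map Gm) (c - ((t + 1 : Nat) : Int)) 0 + 1)
    R 1 (by norm_num) (by norm_num)
  have hB := fold_mod_cast (fun c => 1 ≤ t + 1 ∧ ((t + 1 : Nat) : Int) ≤ c)
    (fun c => Cmod c.toNat (t + 1) + 1) R 1 (by norm_num) (by norm_num)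
  have hcollapse : R.foldl (fun subtot count =>
        if count ≥ ((t + 1 : Nat) : Int) then
          PySem.Int.mod (PySem.Int.mod (subtot *
            (PySem.List.pyGetD ((List.range (M + 1)).map F) count 0 *
             PySem.List.pyGetD ((List.range (M + 1)).map Gm) ((t + 1 : Nat) : Int) 0 *
             PySem.List.pyGetD ((List.range (M + 1)).map Gm) (count - ((t + 1 : Nat) : Int)) 0 + 1))
            (10 ^ 9 + 7)) (10 ^ 9 + 7)
        else subtot) 1
      = R.foldl (fun x c => if c ≥ ((t + 1 : Nat) : Int) then
          PySem.Int.mod (x *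
            (PySem.List.pyGetD ((List.range (M + 1)).map F) c 0 *
             PySem.List.pyGetD ((List.range (M + 1)).map Gm) ((t + 1 : Nat) : Int) 0 *
             PySem.List.pyGetD ((List.range (M + 1)).map Gm) (c - ((t + 1 : Nat) : Int)) 0 + 1))
            (10 ^ 9 + 7)
        else x) 1 := by
    apply PySem.List.foldl_congr_mem
    intro acc x _
    by_cases hx : x ≥ ((t + 1 : Nat) : Int)
    · rw [if_pos hx, if_pos hx, mod_idem]
    · rw [if_neg hx, if_neg hx]
  have hPB : PB R (t + 1) = R.foldl (fun x c => if 1 ≤ t + 1 ∧ ((t + 1 : Nat) : Int) ≤ c then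
      PySem.Int.mod (x * (Cmod c.toNat (t + 1) + 1)) (10 ^ 9 + 7) else x) 1 := rfl
  rw [hcollapse, hPB]
  apply int_eq_of_cast hA.1.1 hA.1.2 hB.1.1 hB.1.2
  rw [hA.2, hB.2]
  beta_reduce
  have hfilter : R.filter (fun c => decide (c ≥ ((t + 1 : Nat) : Int)))
      = R.filter (fun c => decide (1 ≤ t + 1 ∧ ((t + 1 : Nat) : Int) ≤ c)) := by
    apply List.filter_congr
    intro x _
    simp only [decide_eq_decide]
    omega
  rw [← hfilter]
  have hmaps : (R.filter (fun c => decide (c ≥ ((t + 1 : Nat) : Int)))).map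
        (fun c => ((PySem.List.pyGetD ((List.range (M + 1)).map F) c 0 *
          PySem.List.pyGetD ((List.range (M + 1)).map Gm) ((t + 1 : Nat) : Int) 0 *
          PySem.List.pyGetD ((List.range (M + 1)).map Gm) (c - ((t + 1 : Nat) : Int)) 0 + 1 : Int)
          : ZMod 1000000007))
      = (R.filter (fun c => decide (c ≥ ((t + 1 : Nat) : Int)))).map
        (fun c => ((Cmod c.toNat (t + 1) + 1 : Int) : ZMod 1000000007)) := by
    apply List.map_congr_left
    intro c hcm
    rw [List.mem_filter] at hcm
    have hge : ((t + 1 : Nat) : Int) ≤ c := by simpa using hcm.2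
    have hc := hR c hcm.1
    rw [elemA M hcop t htM c hc.1 (by omega) hge]
    push_cast
    ring
  rw [hmaps]

-- ---- structural views of the two ports ----
set_option maxHeartbeats 1000000 in
lemma portA_struct (s : String) :
    countGoodSubsequences s =
      (let arr := s.toList.foldl tstep (List.replicate 26 0)
       let mx := (PySem.List.max? arr (fun x => x)).getD 0
       let facs := (PySem.List.pyRange 1 (mx + 1) 1).foldl stepFac
         (List.replicate (mx + 1).toNat 1, List.replicate (mx + 1).toNat 1)
       (PySem.List.pyRange 1 (mx + 1) 1).foldl (fun tot num =>
         PySem.Int.mod (tot + (arr.foldl (fun subtot count =>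
           if count ≥ num then
             PySem.Int.mod (PySem.Int.mod (subtot * (PySem.List.pyGetD facs.1 count 0 *
               PySem.List.pyGetD facs.2 num 0 * PySem.List.pyGetD facs.2 (count - num) 0 + 1))
               (10 ^ 9 + 7)) (10 ^ 9 + 7)
           else subtot) 1 - 1)) (10 ^ 9 + 7)) 0) := rfl

set_option maxHeartbeats 1000000 in
lemma portB_struct (s : String) :
    countGoodSubsequences_alt s =
      (let arr := s.toList.foldl tstep (List.replicate 26 0)
       let mx := (PySem.List.max? arr (fun x => x)).getD 0
       let tri := (PySem.List.pyRange 1 (mx + 1) 1).foldl triStep [[1]]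
       let prod := arr.foldl (fun prod c =>
         (PySem.List.pyRange 1 (c + 1) 1).foldl (rowStep (PySem.List.pyGetD tri c [])) prod)
         (List.replicate (mx + 1).toNat 1)
       (PySem.List.pyRange 1 (mx + 1) 1).foldl
         (fun tot k => PySem.Int.mod (tot + PySem.List.pyGetD prod k 0 - 1) (10 ^ 9 + 7)) 0) := rfl

theorem main_equiv (s : String)
    (hchars : ∀ c ∈ s.toList, 71 ≤ c.toNat ∧ c.toNat ≤ 122)
    (hPre2 : ∀ j ∈ List.range 26, ∀ n ∈ List.range (bCnt s.toList j + 1),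
      n = 0 ∨ Nat.gcd n 1000000007 = 1) :
    countGoodSubsequences s = countGoodSubsequences_alt s := by
  rw [portA_struct, portB_struct]
  simp only [tally_eq s.toList hchars]
  set R : List Int := (List.range 26).map (fun j => (bCnt s.toList j : Int)) with hR
  set mx : Int := (PySem.List.max? R (fun x => x)).getD 0 with hmxdef
  obtain ⟨m, hm⟩ : ∃ m, PySem.List.max? R (fun x => x) = some m := by
    rcases hmm : PySem.List.max? R (fun x => x) with _ | m
    · exfalso
      rw [PySem.List.max?_eq_none_iff] at hmm
      rw [hR] at hmm
      simp at hmm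
    · exact ⟨m, rfl⟩
  have hmx_eq : mx = m := by rw [hmxdef, hm]; rfl
  have hmem : mx ∈ R := hmx_eq ▸ PySem.List.max?_mem hm
  have hmaxall : ∀ y ∈ R, y ≤ mx := by
    rw [hmx_eq]; exact PySem.List.max?_isMax hm
  obtain ⟨j0, hj0, hmxj⟩ : ∃ j0, j0 ∈ List.range 26 ∧ mx = (bCnt s.toList j0 : Int) := by
    rw [hR] at hmem
    obtain ⟨j, hj, hjm⟩ := List.mem_map.mp hmem
    exact ⟨j, hj, hjm.symm⟩
  have hmx0 : 0 ≤ mx := by rw [hmxj]; positivity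
  set M := mx.toNat with hMdef
  have hM : mx = (M : Int) := by omega
  have hMj : M = bCnt s.toList j0 := by omega
  have hcop : ∀ n : Nat, 1 ≤ n → n ≤ M → Nat.gcd n 1000000007 = 1 := by
    intro n h1 h2
    rcases hPre2 j0 hj0 n (List.mem_range.mpr (by omega)) with h | h
    · omega
    · exact h
  have helem : ∀ c ∈ R, 0 ≤ c ∧ c ≤ (M : Int) := by
    intro c hc
    refine ⟨?_, hM ▸ hmaxall c hc⟩
    rw [hR] at hc
    obtain ⟨j, _, hjc⟩ := List.mem_map.mp hc
    rw [← hjc]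
    positivity
  have htoNat : (mx + 1).toNat = M + 1 := by omega
  rw [htoNat, hM]
  have hfacs := facs_aux M M le_rfl
  simp only [Nat.sub_self, List.replicate_zero, List.append_nil] at hfacs
  rw [hfacs, tri_aux M]
  have hfst : (((List.range (M + 1)).map F, (List.range (M + 1)).map Gm) : List Int × List Int).1
      = (List.range (M + 1)).map F := rfl
  have hsnd : (((List.range (M + 1)).map F, (List.range (M + 1)).map Gm) : List Int × List Int).2
      = (List.range (M + 1)).map Gm := rfl
  rw [hfst, hsnd]
  have hinit : List.replicate (M + 1) (1 : Int) = (List.range (M + 1)).map (fun _ => 1) := by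
    simp
  rw [hinit, outer_char M R helem (fun _ => 1)]
  apply PySem.List.foldl_congr_mem
  intro tot num hnum
  rw [PySem.List.mem_pyRange_one] at hnum
  obtain ⟨t, ht⟩ : ∃ t : Nat, num = ((t + 1 : Nat) : Int) := ⟨num.toNat - 1, by omega⟩
  have htM : t + 1 ≤ M := by omega
  subst ht
  have hlook : PySem.List.pyGetD ((List.range (M + 1)).map (fun (k : Nat) =>
        List.foldl (fun x c => if 1 ≤ k ∧ (k : Int) ≤ c then condFac c.toNat k x else x) 1 R))
      ((t + 1 : Nat) : Int) 0 = PB R (t + 1) := by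
    rw [PySem.List.pyGetD_natCast, PySem.List.getD_map_range _ _ _ _ (by omega)]
    rfl
  rw [hlook, subtot_eq M hcop R helem t htM]
  congr 1
  ring

-- ===== VERDICT (by name: the statement is the Claim_ definition above) =====
theorem countGoodSubsequences_spec : Claim_equal_countGoodSubsequences := by
  intro s _ hPre
  refine (main_equiv s ?_ hPre.2 : _)
  have hall := hPre.1
  rw [List.all_eq_true] at hall
  intro c hc
  have h2 := hall c hc
  simp at h2
  exact h2
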